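-- pv_equiv track=rewrite | github.com/jennharw/Algorithm | test1.py | teokbokki
-- ===== SOURCE A (Python) =====
-- def teokbokki(tlist, N):
--     tlist.sort()
--     start = 0
--     end = tlist[-1]
--     while start <= end:
--         mid = (start + end) // 2
--         sumt = 0
--
--         for t in tlist:
--             if t- mid > 0:
--                 sumt += t - mid
--         if sumt == N:
--             return mid
--         if sumt < N:
--             end = mid - 1
--         else:
--             start = mid + 1
--     return mid
-- ===== SOURCE B (Python) =====
-- def teokbokki(tlist, N):
--     # Same in-place sort and outer binary search as the original, but the
--     # excess sum for each mid is computed in O(log n) via prefix sums and a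
--     # binary search for the first element > mid, instead of an O(n) scan.
--     tlist.sort()
--     n = len(tlist)
--     pre = [0]
--     for t in tlist:
--         pre.append(pre[-1] + t)
--
--     def excess(mid):
--         lo, hi = 0, n
--         while lo < hi:
--             m = (lo + hi) // 2
--             if tlist[m] > mid:
--                 hi = m
--             else:
--                 lo = m + 1
--         return (pre[n] - pre[lo]) - (n - lo) * mid
--
--     start = 0
--     end = tlist[-1]
--     while start <= end:
--         mid = (start + end) // 2
--         sumt = excess(mid)
--         if sumt == N:
--             return mid
--         if sumt < N:
--             end = mid - 1
--         else:
--             start = mid + 1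
--     return mid
-- ===== Notes on version B (the rewrite author's own statement) =====
-- stated objective: faster
-- what changed: B keeps the outer binary search on the cutoff but replaces A's O(n) scan per probe by a precomputed prefix-sum array plus an O(log n) binary search for the first element above the cutoff, so each probe costs O(log n) instead of O(n).
-- outside the precondition, e.g. on teokbokki([], 5): A raises IndexError, B raises IndexError; on teokbokki([-3, -1], 5): A raises NameError, B raises NameError
import Mathlib
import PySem

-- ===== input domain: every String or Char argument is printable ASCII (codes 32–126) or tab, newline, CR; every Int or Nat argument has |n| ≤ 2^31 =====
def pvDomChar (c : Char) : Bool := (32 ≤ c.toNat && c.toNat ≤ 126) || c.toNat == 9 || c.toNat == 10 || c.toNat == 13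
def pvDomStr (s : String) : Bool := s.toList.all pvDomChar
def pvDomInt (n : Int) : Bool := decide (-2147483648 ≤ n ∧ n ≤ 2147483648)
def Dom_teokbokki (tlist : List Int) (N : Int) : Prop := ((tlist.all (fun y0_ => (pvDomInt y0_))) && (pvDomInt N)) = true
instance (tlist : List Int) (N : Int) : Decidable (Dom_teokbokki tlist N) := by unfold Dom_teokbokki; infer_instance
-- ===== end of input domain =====

-- B replaces A's O(n) inner scan per probe by prefix sums + an O(log n) binary
-- search for the first element > mid (objective: faster). Both A and B sort the
-- argument list in place in Python; the equivalence proved here is about the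
-- return value.

-- ===== PORT A =====


-- the inner `for t in tlist` scan accumulating sumt
def pvSumA (tl : List Int) (mid : Int) : Int :=
  tl.foldl (fun sumt t => if t - mid > 0 then sumt + (t - mid) else sumt) 0

-- the `while start <= end` loop; called only when s ≤ e (Python raises NameError
-- otherwise, excluded by Pre_); the trailing `return mid` is the else-branches.
-- fuel = (e - s).toNat + 1 at the call site is a pure totality guard: the gap
-- e - s strictly shrinks each iteration, so the 0-fuel branch is never reached
-- on the actual calls.
def pvLoopA (tl : List Int) (N : Int) : Nat → Int → Int → Int
  | 0, _, _ => 0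
  | fuel + 1, s, e =>
    let mid := PySem.Int.floordiv (s + e) 2
    let sumt := pvSumA tl mid
    if sumt = N then mid
    else if sumt < N then
      (if s ≤ mid - 1 then pvLoopA tl N fuel s (mid - 1) else mid)
    else
      (if mid + 1 ≤ e then pvLoopA tl N fuel (mid + 1) e else mid)

def teokbokki (tlist : List Int) (N : Int) : Int :=
  match PySem.List.pyGet? (PySem.List.sorted tlist (fun x => x) false) (-1) with
  | none => 0                                   -- tlist[-1]: IndexError, outside Pre_
  | some e => if 0 ≤ e then pvLoopA (PySem.List.sorted tlist (fun x => x) false) N ((e - 0).toNat + 1) 0 e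
              else 0                            -- loop never runs: NameError, outside Pre_

-- ===== PORT B =====

-- `pre = [0]; for t in tlist: pre.append(pre[-1] + t)` as a running-total recursion
def pvPrefix (acc : Int) : List Int → List Int
  | [] => [acc]
  | t :: ts => acc :: pvPrefix (acc + t) ts

-- the inner `while lo < hi` binary search of excess()
-- fuel ≥ hi - lo is a pure totality guard (the gap shrinks each iteration)
def pvBS (tl : List Int) (mid : Int) : Nat → Nat → Nat → Nat
  | 0, lo, _ => lo
  | fuel + 1, lo, hi =>
    if lo < hi then
      let m := (lo + hi) / 2
      if mid < tl.getD m 0 then pvBS tl mid fuel lo m else pvBS tl mid fuel (m + 1) hi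
    else lo

def pvExcess (tl : List Int) (pre : List Int) (n : Nat) (mid : Int) : Int :=
  let lo := pvBS tl mid n 0 n
  (pre.getD n 0 - pre.getD lo 0) - ((n : Int) - (lo : Int)) * mid

-- same fuel guard as pvLoopA
def pvLoopB (tl pre : List Int) (n : Nat) (N : Int) : Nat → Int → Int → Int
  | 0, _, _ => 0
  | fuel + 1, s, e =>
    let mid := PySem.Int.floordiv (s + e) 2
    let sumt := pvExcess tl pre n mid
    if sumt = N then mid
    else if sumt < N then
      (if s ≤ mid - 1 then pvLoopB tl pre n N fuel s (mid - 1) else mid)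
    else
      (if mid + 1 ≤ e then pvLoopB tl pre n N fuel (mid + 1) e else mid)

def teokbokki_alt (tlist : List Int) (N : Int) : Int :=
  match PySem.List.pyGet? (PySem.List.sorted tlist (fun x => x) false) (-1) with
  | none => 0
  | some e => if 0 ≤ e then
      pvLoopB (PySem.List.sorted tlist (fun x => x) false)
        (pvPrefix 0 (PySem.List.sorted tlist (fun x => x) false))
        (PySem.List.sorted tlist (fun x => x) false).length N ((e - 0).toNat + 1) 0 e
    else 0

-- ===== PRECONDITION & SPEC =====
-- Pre_ excludes exactly the inputs on which Python A raises: the empty list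
-- (IndexError on tlist[-1]) and lists whose maximum is negative (the while loop
-- never runs and `return mid` raises NameError).
def Pre_teokbokki (tlist : List Int) (N : Int) : Prop := ∃ t ∈ tlist, 0 ≤ t
instance (tlist : List Int) (N : Int) : Decidable (Pre_teokbokki tlist N) := by
  unfold Pre_teokbokki; infer_instance

def pvWitness_teokbokki : List Int × Int := ([3, 1, 4], 2)

def Spec_teokbokki (tlist : List Int) (N : Int) (out : Int) : Prop := out = teokbokki_alt tlist N
instance (tlist : List Int) (N : Int) (out : Int) : Decidable (Spec_teokbokki tlist N out) := by unfold Spec_teokbokki; infer_instance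

-- ===== CLAIM (what is proved, stated in full; the proofs are below) =====
def Claim_equal_teokbokki : Prop := ∀ (tlist : List Int) (N : Int), Dom_teokbokki tlist N → Pre_teokbokki tlist N → Spec_teokbokki tlist N (teokbokki tlist N)

-- ===== LEMMAS AND PROOFS =====

theorem pvSumA_foldl_acc (mid : Int) (tl : List Int) (a : Int) :
    tl.foldl (fun sumt t => if t - mid > 0 then sumt + (t - mid) else sumt) a
      = a + pvSumA tl mid := by
  induction tl generalizing a with
  | nil => simp [pvSumA]
  | cons t ts ih =>
    rw [pvSumA, List.foldl_cons, List.foldl_cons, ih, ih (if t - mid > 0 then 0 + (t - mid) else 0)]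
    split <;> ring

theorem pvSumA_cons (t : Int) (ts : List Int) (mid : Int) :
    pvSumA (t :: ts) mid = (if t - mid > 0 then t - mid else 0) + pvSumA ts mid := by
  rw [pvSumA, List.foldl_cons, pvSumA_foldl_acc]
  split <;> ring

theorem pvSumA_append (xs ys : List Int) (mid : Int) :
    pvSumA (xs ++ ys) mid = pvSumA xs mid + pvSumA ys mid := by
  rw [pvSumA, List.foldl_append]
  exact pvSumA_foldl_acc mid ys _

theorem pvSumA_of_all_le (xs : List Int) (mid : Int) (h : ∀ t ∈ xs, t ≤ mid) :
    pvSumA xs mid = 0 := by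
  induction xs with
  | nil => rfl
  | cons t ts ih =>
    rw [pvSumA_cons, ih (fun x hx => h x (by simp [hx]))]
    have ht : t ≤ mid := h t (by simp)
    split <;> omega

theorem pvSumA_of_all_gt (xs : List Int) (mid : Int) (h : ∀ t ∈ xs, mid < t) :
    pvSumA xs mid = xs.sum - (xs.length : Int) * mid := by
  induction xs with
  | nil => simp [pvSumA]
  | cons t ts ih =>
    rw [pvSumA_cons, ih (fun x hx => h x (by simp [hx]))]
    have ht : mid < t := h t (by simp)
    rw [if_pos (by omega : t - mid > 0)]
    simp only [List.sum_cons, List.length_cons]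
    push_cast
    ring

theorem pvPrefix_getD (tl : List Int) (a : Int) (k : Nat) (hk : k ≤ tl.length) :
    (pvPrefix a tl).getD k 0 = a + (tl.take k).sum := by
  induction tl generalizing a k with
  | nil =>
    have : k = 0 := by simpa using hk
    subst this
    simp [pvPrefix]
  | cons t ts ih =>
    cases k with
    | zero => simp [pvPrefix]
    | succ k =>
      simp only [pvPrefix, List.getD_cons_succ, List.take_succ_cons, List.sum_cons]
      rw [ih (a + t) k (by simpa using hk)]
      ring

theorem getD_eq_getElem' (tl : List Int) (i : Nat) (h : i < tl.length) :
    tl.getD i 0 = tl[i] := by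
  simp [List.getD_eq_getElem?_getD, List.getElem?_eq_getElem h]

theorem pvBS_spec (tl : List Int) (mid : Int) (hs : tl.Pairwise (· ≤ ·)) :
    ∀ (k lo hi : Nat), hi - lo ≤ k → hi ≤ tl.length → lo ≤ hi →
    (∀ i < lo, tl.getD i 0 ≤ mid) →
    (∀ i, hi ≤ i → i < tl.length → mid < tl.getD i 0) →
    pvBS tl mid k lo hi ≤ tl.length ∧
      (∀ i < pvBS tl mid k lo hi, tl.getD i 0 ≤ mid) ∧
      (∀ i, pvBS tl mid k lo hi ≤ i → i < tl.length → mid < tl.getD i 0) := by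
  have hpw := List.pairwise_iff_getElem.mp hs
  intro k
  induction k with
  | zero =>
    intro lo hi hk hhi hlh h1 h2
    rw [pvBS]
    exact ⟨by omega, h1, fun i hi' hilen => h2 i (by omega) hilen⟩
  | succ k ih =>
    intro lo hi hk hhi hlh h1 h2
    rw [pvBS]
    by_cases hlt : lo < hi
    · rw [if_pos hlt]
      show (if mid < tl.getD ((lo + hi) / 2) 0 then pvBS tl mid k lo ((lo + hi) / 2)
            else pvBS tl mid k ((lo + hi) / 2 + 1) hi) ≤ tl.length ∧ _ ∧ _
      set m := (lo + hi) / 2 with hm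
      have hmlo : lo ≤ m := by omega
      have hmhi : m < hi := by omega
      by_cases hcond : mid < tl.getD m 0
      · rw [if_pos hcond]
        refine ih lo m (by omega) (by omega) (by omega) h1 ?_
        intro i hmi hilen
        rcases Nat.eq_or_lt_of_le hmi with h | h
        · exact h ▸ hcond
        · have hmlen : m < tl.length := by omega
          have hle : tl[m] ≤ tl[i] := hpw m i hmlen hilen h
          rw [getD_eq_getElem' tl i hilen]
          rw [getD_eq_getElem' tl m hmlen] at hcond
          omega
      · rw [if_neg hcond]
        refine ih (m + 1) hi (by omega) hhi (by omega) ?_ h2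
        intro i hi'
        by_cases hil : i < lo
        · exact h1 i hil
        · have hilen : i < tl.length := by omega
          have hmlen : m < tl.length := by omega
          have : tl[i] ≤ tl[m] := by
            rcases Nat.lt_or_ge i m with h | h
            · exact hpw i m hilen hmlen h
            · have : i = m := by omega
              exact this ▸ le_refl _
          rw [getD_eq_getElem' tl i hilen]
          rw [getD_eq_getElem' tl m hmlen] at hcond
          omega
    · rw [if_neg hlt]
      exact ⟨by omega, h1, fun i hi' hilen => h2 i (by omega) hilen⟩

theorem excess_eq (tl : List Int) (hs : tl.Pairwise (· ≤ ·)) (mid : Int) :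
    pvExcess tl (pvPrefix 0 tl) tl.length mid = pvSumA tl mid := by
  obtain ⟨hr, hlow, hhigh⟩ := pvBS_spec tl mid hs tl.length 0 tl.length (by omega)
    le_rfl (Nat.zero_le _) (by omega) (by omega)
  rw [pvExcess]
  set r := pvBS tl mid tl.length 0 tl.length with hrdef
  rw [pvPrefix_getD tl 0 tl.length le_rfl, pvPrefix_getD tl 0 r hr]
  conv_rhs => rw [← List.take_append_drop r tl]
  rw [pvSumA_append]
  rw [pvSumA_of_all_le (tl.take r) mid ?hle, pvSumA_of_all_gt (tl.drop r) mid ?hgt]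
  case hle =>
    intro t ht
    obtain ⟨i, hi, rfl⟩ := List.mem_iff_getElem.mp ht
    rw [List.getElem_take]
    have hir : i < r := by
      have := hi
      simp [List.length_take] at this
      omega
    have hilen : i < tl.length := by
      have := hi; simp [List.length_take] at this; omega
    rw [← getD_eq_getElem' tl i hilen]
    exact hlow i hir
  case hgt =>
    intro t ht
    obtain ⟨i, hi, rfl⟩ := List.mem_iff_getElem.mp ht
    rw [List.getElem_drop]
    have hilen : r + i < tl.length := by
      have := hi; simp [List.length_drop] at this; omega
    rw [← getD_eq_getElem' tl (r + i) hilen]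
    exact hhigh (r + i) (by omega) hilen
  have hsum : (tl.take r).sum + (tl.drop r).sum = tl.sum := by
    rw [← List.sum_append, List.take_append_drop]
  have hlen : ((tl.drop r).length : Int) = (tl.length : Int) - (r : Int) := by
    rw [List.length_drop]; omega
  rw [List.take_length, hlen]
  linarith [hsum]

theorem loop_eq (tl : List Int) (hs : tl.Pairwise (· ≤ ·)) (N : Int) :
    ∀ (fuel : Nat) (s e : Int),
      pvLoopA tl N fuel s e = pvLoopB tl (pvPrefix 0 tl) tl.length N fuel s e := by
  intro fuel
  induction fuel with
  | zero => intro s e; rfl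
  | succ fuel ih =>
    intro s e
    rw [pvLoopA, pvLoopB]
    simp only [excess_eq tl hs]
    split
    · rfl
    · split
      · split
        · exact ih s _
        · rfl
      · split
        · exact ih _ e
        · rfl

theorem sorted_pairwise_id (xs : List Int) :
    (PySem.List.sorted xs (fun x => x) false).Pairwise (· ≤ ·) :=
  PySem.List.sorted_pairwise xs (fun x => x)

-- ===== VERDICT (by name: the statement is the Claim_ definition above) =====
theorem teokbokki_spec : Claim_equal_teokbokki := by
  intro tlist N _ _
  unfold Spec_teokbokki teokbokki teokbokki_alt
  cases hE : PySem.List.pyGet? (PySem.List.sorted tlist (fun x => x) false) (-1) with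
  | none => rfl
  | some e =>
    dsimp only
    by_cases h0 : 0 ≤ e
    · rw [if_pos h0, if_pos h0]
      exact loop_eq _ (sorted_pairwise_id tlist) N _ 0 e
    · rw [if_neg h0, if_neg h0]
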